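-- pv_equiv track=rewrite | github.com/DotteDot/algorithm | BOJ/Python/[Python]BOJ_1436.py | check
-- ===== SOURCE A (Python) =====
-- def check(n):
--     cnt = 0
--     for i in str(n):
--         if i == '6':
--             cnt += 1
--         else:
--             cnt = 0
--         if cnt == 3:
--             return 1
--     return 0
-- ===== SOURCE B (Python) =====
-- def check(n):
--     return 1 if '666' in str(n) else 0
-- ===== Notes on version B (the rewrite author's own statement) =====
-- stated objective: simpler
-- what changed: Replaces the explicit consecutive-'6' counter loop with a single built-in substring membership test '666' in str(n).
import Mathlib
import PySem

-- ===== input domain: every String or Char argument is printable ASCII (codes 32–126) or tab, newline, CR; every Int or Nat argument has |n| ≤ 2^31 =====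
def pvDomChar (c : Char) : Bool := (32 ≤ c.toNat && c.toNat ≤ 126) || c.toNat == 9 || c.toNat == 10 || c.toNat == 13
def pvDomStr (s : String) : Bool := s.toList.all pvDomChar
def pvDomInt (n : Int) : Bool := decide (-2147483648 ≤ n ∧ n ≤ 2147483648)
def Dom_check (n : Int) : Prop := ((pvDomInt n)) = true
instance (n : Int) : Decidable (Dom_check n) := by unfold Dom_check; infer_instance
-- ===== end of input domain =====

-- B replaces A's consecutive-'6' counter loop by a direct '666' substring test on str(n); objective: simpler.

-- ===== PORT A =====
-- the 'for i in str(n)' loop with counter cnt and early 'return 1'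
def checkLoop : List Char → Int → Int
  | [], _ => 0
  | c :: t, cnt =>
    let cnt' := if c = '6' then cnt + 1 else 0
    if cnt' = 3 then 1 else checkLoop t cnt'

def check (n : Int) : Int := checkLoop (PySem.Int.toChars n) 0

-- ===== PORT B =====
def check_alt (n : Int) : Int :=
  if PySem.Str.isIn "666" (PySem.Int.toStr n) then 1 else 0

-- ===== PRECONDITION & SPEC =====
def Spec_check (n : Int) (out : Int) : Prop := out = check_alt n
instance (n : Int) (out : Int) : Decidable (Spec_check n out) := by unfold Spec_check; infer_instance

-- ===== CLAIM (what is proved, stated in full; the proofs are below) =====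
def Claim_equal_check : Prop := ∀ (n : Int), Dom_check n → Spec_check n (check n)

-- ===== LEMMAS AND PROOFS =====

-- loop invariant: with cnt ∈ {0,1,2} trailing sixes already seen (rep = those sixes),
-- the loop finds '666' exactly when ['6','6','6'] is an infix of rep ++ l
theorem checkLoop_eq (l : List Char) :
    ∀ (cnt : Int) (rep : List Char),
      (cnt = 0 ∧ rep = [] ∨ cnt = 1 ∧ rep = ['6'] ∨ cnt = 2 ∧ rep = ['6','6']) →
      checkLoop l cnt = if ['6','6','6'] <:+: (rep ++ l) then 1 else 0 := by
  induction l with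
  | nil =>
    rintro cnt rep (⟨rfl, rfl⟩ | ⟨rfl, rfl⟩ | ⟨rfl, rfl⟩) <;>
    all_goals
      rw [if_neg (fun h => by have := List.IsInfix.length_le h; simp at this)]; rfl
  | cons c t ih =>
    rintro cnt rep (⟨rfl, rfl⟩ | ⟨rfl, rfl⟩ | ⟨rfl, rfl⟩)
    · by_cases hc : c = '6'
      · subst hc
        have h := ih 1 ['6'] (by simp)
        simpa [checkLoop] using h
      · have h := ih 0 [] (by simp)
        simp only [checkLoop, if_neg hc, List.nil_append] at h ⊢
        rw [if_neg (by decide), h]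
        congr 1
        simp only [eq_iff_iff]
        rw [List.infix_cons_iff]
        symm
        constructor
        · rintro (hp | hi)
          · exact absurd (List.cons_prefix_cons.mp hp).1.symm hc
          · exact hi
        · exact Or.inr
    · by_cases hc : c = '6'
      · subst hc
        have h := ih 2 ['6','6'] (by simp)
        simpa [checkLoop] using h
      · have h := ih 0 [] (by simp)
        simp only [checkLoop, if_neg hc, List.nil_append] at h ⊢
        rw [if_neg (by decide), h]
        congr 1
        simp only [eq_iff_iff]
        rw [List.cons_append, List.nil_append, List.infix_cons_iff, List.infix_cons_iff]
        symm
        constructor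
        · rintro (hp | hp | hi)
          · exact absurd (List.cons_prefix_cons.mp (List.cons_prefix_cons.mp hp).2).1.symm hc
          · exact absurd (List.cons_prefix_cons.mp hp).1.symm hc
          · exact hi
        · exact fun hi => Or.inr (Or.inr hi)
    · by_cases hc : c = '6'
      · subst hc
        simp only [checkLoop]
        rw [if_pos (by decide), if_pos ⟨[], t, rfl⟩]
      · have h := ih 0 [] (by simp)
        simp only [checkLoop, if_neg hc, List.nil_append] at h ⊢
        rw [if_neg (by decide), h]
        congr 1
        simp only [eq_iff_iff]
        rw [List.cons_append, List.cons_append, List.nil_append,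
            List.infix_cons_iff, List.infix_cons_iff, List.infix_cons_iff]
        symm
        constructor
        · rintro (hp | hp | hp | hi)
          · exact absurd (List.cons_prefix_cons.mp (List.cons_prefix_cons.mp (List.cons_prefix_cons.mp hp).2).2).1.symm hc
          · exact absurd (List.cons_prefix_cons.mp (List.cons_prefix_cons.mp hp).2).1.symm hc
          · exact absurd (List.cons_prefix_cons.mp hp).1.symm hc
          · exact hi
        · exact fun hi => Or.inr (Or.inr (Or.inr hi))

-- ===== VERDICT (by name: the statement is the Claim_ definition above) =====
theorem check_spec : Claim_equal_check := by
  intro n _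
  show check n = check_alt n
  rw [check, check_alt, checkLoop_eq _ 0 [] (by simp)]
  rw [show PySem.Str.isIn "666" (PySem.Int.toStr n)
        = PySem.Chars.isIn "666".toList (PySem.Int.toStr n).toList from by
      simp [PySem.Str.isIn]]
  rw [PySem.Int.toList_toStr, show ("666".toList : List Char) = ['6','6','6'] from by decide]
  simp only [List.nil_append]
  by_cases h : (['6','6','6'] : List Char) <:+: PySem.Int.toChars n
  · rw [if_pos h, if_pos ((PySem.Chars.isIn_iff_infix _ _).mpr h)]
  · rw [if_neg h, if_neg (by simp [PySem.Chars.isIn_eq_false_iff]; exact h)]
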